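-- pv_equiv track=rewrite | github.com/Arsen1302/Code-copy-detector | TestData/solutions/problem_884_5.py | solution_884_5
-- ===== SOURCE A (Python) =====
-- from typing import List
--
-- def solution_884_5(mat: List[List[int]], k: int) -> List[int]:
-- 	helper = {}
-- 	for index, row in enumerate(mat):
-- 		helper[index] = 0
-- 		for num in row:
-- 			if num: helper[index] += 1
-- 			else: break
-- 	ans = sorted(helper, key = helper.get)
-- 	return ans[:k]
-- ===== SOURCE B (Python) =====
-- from typing import List
--
-- def solution_884_5(mat: List[List[int]], k: int) -> List[int]:
--     # Bucket row indices by their leading-nonzero count (found with list.index,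
--     # a C-level scan), then emit buckets in ascending count order: no comparison
--     # sort over all m rows, only over the distinct counts.
--     buckets = {}
--     for i, row in enumerate(mat):
--         try:
--             c = row.index(0)
--         except ValueError:
--             c = len(row)
--         buckets.setdefault(c, []).append(i)
--     ans = []
--     for c in sorted(buckets):
--         ans += buckets[c]
--     return ans[:k]
-- ===== Notes on version B (the rewrite author's own statement) =====
-- stated objective: faster
-- what changed: Replaces the per-element Python inner loop by a C-level row.index(0) scan and the comparison sort of all m row indices (with a per-comparison helper.get key call) by bucketing indices under their count and sorting only the distinct counts.
import Mathlib
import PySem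

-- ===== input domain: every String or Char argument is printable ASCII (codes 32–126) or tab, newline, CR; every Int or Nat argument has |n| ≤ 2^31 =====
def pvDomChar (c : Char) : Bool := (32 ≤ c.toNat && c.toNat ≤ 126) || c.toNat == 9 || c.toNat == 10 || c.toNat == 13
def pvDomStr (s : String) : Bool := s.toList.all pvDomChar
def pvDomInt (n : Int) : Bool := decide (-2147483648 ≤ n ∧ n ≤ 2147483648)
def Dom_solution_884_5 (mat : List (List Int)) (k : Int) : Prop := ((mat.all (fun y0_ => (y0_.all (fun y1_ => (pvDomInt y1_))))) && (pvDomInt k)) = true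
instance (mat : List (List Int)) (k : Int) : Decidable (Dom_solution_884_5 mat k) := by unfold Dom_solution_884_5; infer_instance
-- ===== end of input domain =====

-- B replaces A's per-element inner loop by row.index(0) and A's comparison sort of all
-- m row indices by bucketing the indices under their count and sorting only the
-- distinct counts (measurably faster in Python by a constant factor).

-- ===== PORT A =====
-- inner loop 'for num in row: if num: helper[index] += 1 else: break';
-- 'helper[index] += 1' is Dict.modify at a key inserted just before, so always
-- present and modify's default 0 is never used.
def pvInnerA (idx : Int) (row : List Int) (d : PySem.Dict Int Int) : PySem.Dict Int Int :=
  match row with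
  | [] => d
  | num :: rest => if num ≠ 0 then pvInnerA idx rest (d.modify idx 0 (· + 1)) else d

def solution_884_5 (mat : List (List Int)) (k : Int) : List Int :=
  let helper := (PySem.List.enumerate mat).foldl
    (fun d p => pvInnerA p.1 p.2 (d.insert p.1 0)) PySem.Dict.empty
  -- 'sorted(helper, key=helper.get)': every key iterated is present in helper,
  -- so .get never yields None and getD's default 0 is never used.
  let ans := PySem.List.sorted helper.keys (fun i => helper.getD i 0) false
  PySem.List.slice ans none (some k)

-- ===== PORT B =====
-- 'row.index(0)' with the ValueError branch returning len(row)
def pvCountB (row : List Int) : Int :=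
  match PySem.List.index? row 0 with
  | some j => (j : Int)
  | none => (row.length : Int)

def solution_884_5_alt (mat : List (List Int)) (k : Int) : List Int :=
  -- 'buckets.setdefault(c, []).append(i)' is buckets[c] = buckets.get(c, []) + [i], i.e. Dict.modify
  let buckets := (PySem.List.enumerate mat).foldl
    (fun b p => b.modify (pvCountB p.2) [] (fun l => l ++ [p.1])) PySem.Dict.empty
  let ans := (PySem.List.sorted buckets.keys (fun c => c) false).foldl
    (fun acc c => acc ++ buckets.getD c []) []
  PySem.List.slice ans none (some k)

-- ===== PRECONDITION & SPEC =====
def Spec_solution_884_5 (mat : List (List Int)) (k : Int) (out : List Int) : Prop := out = solution_884_5_alt mat k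
instance (mat : List (List Int)) (k : Int) (out : List Int) : Decidable (Spec_solution_884_5 mat k out) := by unfold Spec_solution_884_5; infer_instance

-- ===== CLAIM (what is proved, stated in full; the proofs are below) =====
def Claim_equal_solution_884_5 : Prop := ∀ (mat : List (List Int)) (k : Int), Dom_solution_884_5 mat k → Spec_solution_884_5 mat k (solution_884_5 mat k)

-- ===== LEMMAS AND PROOFS =====

theorem pvCountB_cons_zero (rest : List Int) : pvCountB (0 :: rest) = 0 := by
  unfold pvCountB
  rw [PySem.List.index?_cons_self]; simp

theorem pvCountB_cons_ne (num : Int) (rest : List Int) (h : num ≠ 0) :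
    pvCountB (num :: rest) = 1 + pvCountB rest := by
  unfold pvCountB
  rw [PySem.List.index?_cons_of_ne rest h]
  cases h' : PySem.List.index? rest 0 <;> simp <;> omega

theorem pvInnerA_insert (idx : Int) (row : List Int) :
    ∀ (d : PySem.Dict Int Int) (a : Int),
      pvInnerA idx row (d.insert idx a) = d.insert idx (a + pvCountB row) := by
  induction row with
  | nil =>
    intro d a
    simp [pvInnerA, pvCountB, PySem.List.index?]
  | cons num rest ih =>
    intro d a
    by_cases h : num = 0
    · subst h
      simp [pvInnerA, pvCountB_cons_zero]
    · rw [pvCountB_cons_ne num rest h]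
      simp only [pvInnerA, h, if_pos, ne_eq, not_false_iff]
      rw [PySem.Dict.modify, PySem.Dict.getD_insert_self, PySem.Dict.insert_insert_self, ih]
      ring_nf

theorem helperA_items (mat : List (List Int)) :
    ((PySem.List.enumerate mat).foldl
      (fun d p => pvInnerA p.1 p.2 (d.insert p.1 0)) PySem.Dict.empty).items
    = (PySem.List.enumerate mat).map (fun p => (p.1, pvCountB p.2)) := by
  rw [PySem.List.foldl_congr_mem (PySem.List.enumerate mat)
      (fun d p => pvInnerA p.1 p.2 (d.insert p.1 0))
      (fun d p => d.insert p.1 (pvCountB p.2)) PySem.Dict.empty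
      (by intro acc p _; show pvInnerA p.1 p.2 (acc.insert p.1 0) = acc.insert p.1 (pvCountB p.2); rw [pvInnerA_insert]; simp)]
  rw [PySem.Dict.items_foldl_insert_fresh (PySem.List.enumerate mat) Prod.fst
      (fun p => pvCountB p.2) PySem.Dict.empty
      (by intro p _; exact PySem.Dict.contains_empty _)
      ?nd]
  · simp [PySem.Dict.empty]
  case nd =>
    have hp := PySem.List.pairwise_lt_enumerate mat 0
    have : ((PySem.List.enumerate mat).map Prod.fst).Pairwise (· < ·) := by
      rw [List.pairwise_map]; exact hp
    exact this.imp ne_of_lt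

theorem insertBy_nil {α : Type} (before : α → α → Bool) (x : α) :
    PySem.List.insertBy before x [] = [x] := rfl

theorem insertBy_cons {α : Type} (before : α → α → Bool) (x y : α) (ys : List α) :
    PySem.List.insertBy before x (y :: ys)
      = if before x y then x :: y :: ys else y :: PySem.List.insertBy before x ys := rfl

theorem insertBy_prefix_no {α : Type} (before : α → α → Bool) (x : α) (pre t : List α)
    (h : ∀ y ∈ pre, before x y = false) :
    PySem.List.insertBy before x (pre ++ t) = pre ++ PySem.List.insertBy before x t := by
  induction pre with
  | nil => rfl
  | cons y ys ih =>
    have hy : before x y = false := h y (by simp)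
    simp only [List.cons_append, insertBy_cons, hy, Bool.false_eq_true, if_false]
    rw [ih (fun z hz => h z (by simp [hz]))]

theorem pvInsert_flatMap {α : Type} (key : α → Int) (x : α) :
    ∀ (K : List Int) (g : Int → List α),
      K.Pairwise (· < ·) →
      (∀ c ∈ K, g c ≠ []) →
      (∀ c ∈ K, ∀ a ∈ g c, key a = c) →
      (key x ∉ K → g (key x) = []) →
      PySem.List.insertBy (fun a b => decide (key a < key b)) x (K.flatMap g)
        = (if key x ∈ K then K
           else PySem.List.insertBy (fun a b => decide (a < b)) (key x) K).flatMap
            (fun c => g c ++ if key x = c then [x] else []) := by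
  intro K
  induction K with
  | nil =>
    intro g _ _ _ h4
    simp [insertBy_nil, h4 (by simp)]
  | cons c K' ih =>
    intro g hpw hne hkey h4
    have hcK' : ∀ c' ∈ K', c < c' := fun c' hc' => (List.pairwise_cons.mp hpw).1 c' hc'
    have hpw' : K'.Pairwise (· < ·) := (List.pairwise_cons.mp hpw).2
    rcases lt_trichotomy (key x) c with hlt | heq | hgt
    · -- key x < c : x goes in front, in a fresh group
      have hxK : key x ∉ c :: K' := by
        intro hmem
        rcases List.mem_cons.mp hmem with h | h
        · omega
        · have := hcK' _ h; omega
      have hgx : g (key x) = [] := h4 hxK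
      obtain ⟨y, t, hy⟩ : ∃ y t, g c = y :: t := by
        cases hgc : g c with
        | nil => exact absurd hgc (hne c (by simp))
        | cons y t => exact ⟨y, t, rfl⟩
      have hky : key y = c := hkey c (by simp) y (by rw [hy]; simp)
      have hL : PySem.List.insertBy (fun a b => decide (key a < key b)) x ((c :: K').flatMap g)
          = x :: (c :: K').flatMap g := by
        rw [List.flatMap_cons, hy]
        simp only [List.cons_append, insertBy_cons]
        rw [if_pos (by simp [hky, hlt])]
      rw [hL, if_neg hxK, insertBy_cons, if_pos (by simp [hlt]),
        List.flatMap_cons, List.flatMap_cons, hgx]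
      have hflat : K'.flatMap (fun c' => g c' ++ if key x = c' then [x] else [])
          = K'.flatMap g := by
        apply List.flatMap_congr
        intro c' hc'
        rw [if_neg (by have := hcK' c' hc'; omega), List.append_nil]
      rw [List.flatMap_cons, hflat]
      simp [hy, (show key x ≠ c by omega)]
    · -- key x = c : x appended to group c
      subst heq
      have hxnotK' : key x ∉ K' := fun hc => by have := hcK' _ hc; omega
      rw [if_pos (by simp), List.flatMap_cons, List.flatMap_cons]
      have hnotr : ∀ y ∈ g (key x), (fun a b => decide (key a < key b)) x y = false := by
        intro y hy
        have := hkey (key x) (by simp) y hy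
        simp [this]
      rw [insertBy_prefix_no _ _ _ _ hnotr]
      have hflat : K'.flatMap (fun c' => g c' ++ if key x = c' then [x] else [])
          = K'.flatMap g := by
        apply List.flatMap_congr
        intro c' hc'
        rw [if_neg (by have := hcK' c' hc'; omega), List.append_nil]
      rw [hflat, if_pos rfl]
      have hins : PySem.List.insertBy (fun a b => decide (key a < key b)) x (K'.flatMap g)
          = x :: K'.flatMap g := by
        cases hK' : K' with
        | nil => simp [insertBy_nil]
        | cons c' K'' =>
          obtain ⟨y, t, hy⟩ : ∃ y t, g c' = y :: t := by
            cases hgc : g c' with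
            | nil => exact absurd hgc (hne c' (by rw [hK']; simp))
            | cons y t => exact ⟨y, t, rfl⟩
          have hky : key y = c' := hkey c' (by rw [hK']; simp) y (by rw [hy]; simp)
          have hlt' : key x < c' := hcK' c' (by rw [hK']; simp)
          rw [List.flatMap_cons, hy]
          simp only [List.cons_append, insertBy_cons]
          rw [if_pos (by simp [hky, hlt'])]
      rw [hins]
      simp
    · -- c < key x : skip group c, recurse
      have hnotr : ∀ y ∈ g c, (fun a b => decide (key a < key b)) x y = false := by
        intro y hy
        have := hkey c (by simp) y hy
        simp [this]; omega
      have hxc : key x ≠ c := by omega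
      have ihr := ih g hpw' (fun c' hc' => hne c' (by simp [hc']))
        (fun c' hc' => hkey c' (by simp [hc']))
        (fun hnm => h4 (by simp [hxc, hnm]))
      rw [List.flatMap_cons, insertBy_prefix_no _ _ _ _ hnotr, ihr]
      by_cases hmem : key x ∈ K'
      · rw [if_pos hmem, if_pos (by simp [hmem]), List.flatMap_cons, if_neg hxc]
        simp
      · rw [if_neg hmem, if_neg (by simp [hxc, hmem]), insertBy_cons,
          if_neg (by simp; omega), List.flatMap_cons, if_neg hxc]
        simp

theorem pvSorted_eq_flatMap {α : Type} (xs : List α) (key : α → Int) :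
    PySem.List.sorted xs key false
      = (PySem.List.sorted (PySem.Set.ofList (xs.map key)) (fun c => c) false).flatMap
          (fun c => xs.filter (fun a => key a == c)) := by
  induction xs using List.reverseRecOn with
  | nil => simp [PySem.List.sorted, PySem.Set.ofList]
  | append_singleton l x ih =>
    have hfold := PySem.List.sorted_eq_foldl_insertBy (l ++ [x]) key
    rw [List.foldl_append, ← PySem.List.sorted_eq_foldl_insertBy l key] at hfold
    simp only [List.foldl_cons, List.foldl_nil] at hfold
    rw [hfold, ih]
    -- the fibres of l, as groups
    set g : Int → List α := fun c => l.filter (fun a => key a == c) with hg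
    set K : List Int := PySem.List.sorted (PySem.Set.ofList (l.map key)) (fun c => c) false with hK
    have hKpw : K.Pairwise (· < ·) := PySem.List.sorted_ofList_pairwise_lt (l.map key)
    have hmemK : ∀ c, c ∈ K ↔ c ∈ l.map key := by
      intro c
      rw [hK, PySem.List.mem_sorted, PySem.Set.mem_ofList]
    have hne : ∀ c ∈ K, g c ≠ [] := by
      intro c hc
      obtain ⟨a, ha, hac⟩ := List.mem_map.mp ((hmemK c).mp hc)
      exact List.ne_nil_of_mem (List.mem_filter.mpr ⟨ha, by simp [hac]⟩)
    have hkey : ∀ c ∈ K, ∀ a ∈ g c, key a = c := by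
      intro c _ a ha
      exact beq_iff_eq.mp (List.mem_filter.mp ha).2
    have h4 : key x ∉ K → g (key x) = [] := by
      intro hnm
      rw [hg]
      apply List.filter_eq_nil_iff.mpr
      intro a ha
      simp only [beq_iff_eq]
      intro hax
      exact hnm ((hmemK _).mpr (List.mem_map.mpr ⟨a, ha, hax⟩))
    rw [pvInsert_flatMap key x K g hKpw hne hkey h4]
    -- now identify the right-hand sides
    have hfilters : ∀ c : Int, (l ++ [x]).filter (fun a => key a == c)
        = g c ++ if key x = c then [x] else [] := by
      intro c
      rw [List.filter_append]
      congr 1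
      by_cases h : key x = c <;> simp [h]
    have hofl : PySem.Set.ofList ((l ++ [x]).map key)
        = if key x ∈ l.map key then PySem.Set.ofList (l.map key)
          else PySem.Set.ofList (l.map key) ++ [key x] := by
      rw [List.map_append, PySem.Set.ofList_eq_foldl, List.foldl_append,
        ← PySem.Set.ofList_eq_foldl]
      simp only [List.map_cons, List.map_nil, List.foldl_cons, List.foldl_nil]
      rw [PySem.Set.add]
      by_cases h : key x ∈ l.map key
      · rw [if_pos (by simp [PySem.Set.contains, PySem.Set.mem_ofList, h]), if_pos h]
      · rw [if_neg (by simp [PySem.Set.contains, PySem.Set.mem_ofList, h]), if_neg h]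
    by_cases hmem : key x ∈ l.map key
    · rw [if_pos ((hmemK _).mpr hmem)]
      rw [hofl, if_pos hmem, ← hK]
      exact (List.flatMap_congr (fun c _ => (hfilters c).symm)).symm ▸ rfl
    · rw [if_neg (fun h => hmem ((hmemK _).mp h))]
      rw [hofl, if_neg hmem]
      have hsortapp : PySem.List.sorted (PySem.Set.ofList (l.map key) ++ [key x]) (fun c => c) false
          = PySem.List.insertBy (fun a b => decide (a < b)) (key x) K := by
        rw [PySem.List.sorted_eq_foldl_insertBy, List.foldl_append,
          ← PySem.List.sorted_eq_foldl_insertBy, ← hK]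
        simp only [List.foldl_cons, List.foldl_nil]
      rw [hsortapp]
      exact (List.flatMap_congr (fun c _ => (hfilters c).symm)).symm ▸ rfl

theorem pv_main (mat : List (List Int)) (k : Int) :
    solution_884_5 mat k = solution_884_5_alt mat k := by
  unfold solution_884_5 solution_884_5_alt
  simp only []
  set E := PySem.List.enumerate mat with hE
  set helper := E.foldl (fun d p => pvInnerA p.1 p.2 (d.insert p.1 0)) PySem.Dict.empty with hhelper
  set buckets := E.foldl (fun b p => b.modify (pvCountB p.2) [] (fun l => l ++ [p.1])) PySem.Dict.empty with hbuckets
  have hitems : helper.items = E.map (fun p => (p.1, pvCountB p.2)) := helperA_items mat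
  have hkeys : helper.keys = E.map (fun p => p.1) := by
    show helper.items.map (·.1) = _
    rw [hitems, List.map_map]
    rfl
  have hndE : (E.map (fun p => p.1)).Nodup := by
    have hp := PySem.List.pairwise_lt_enumerate mat 0
    have : (E.map (fun p : Int × List Int => p.1)).Pairwise (· < ·) := by
      rw [List.pairwise_map]; exact hp
    exact this.imp ne_of_lt
  have hnd : helper.keys.Nodup := by rw [hkeys]; exact hndE
  have hgetD : ∀ p ∈ E, helper.getD p.1 0 = pvCountB p.2 := by
    intro p hp
    exact PySem.Dict.getD_of_mem_items helper
      (by rw [hitems]; exact List.mem_map.mpr ⟨p, hp, rfl⟩) hnd 0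
  -- B-side bucket characterization
  have hbk2 : buckets = (E.map (fun p => (pvCountB p.2, p.1))).foldl
      (fun d q => d.modify q.1 [] (fun l => l ++ [q.2])) PySem.Dict.empty := by
    rw [List.foldl_map]
  have hbkeys : buckets.keys = PySem.Set.ofList (E.map (fun p => pvCountB p.2)) := by
    rw [hbuckets, PySem.Dict.keys_foldl_modify_key E (fun p => pvCountB p.2) []
      (fun _ p => (fun l => l ++ [p.1]))]
    rw [PySem.Set.ofList_eq_foldl]
    rfl
  have hbgetD : ∀ c : Int, buckets.getD c []
      = ((E.map (fun p => (pvCountB p.2, p.1))).filter (fun q => q.1 == c)).map (fun q => q.2) := by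
    intro c
    rw [hbk2, PySem.Dict.getD_foldl_modify_append, PySem.Dict.getD_empty]
    rfl
  -- A-side sort as bucket concatenation
  rw [hkeys, pvSorted_eq_flatMap (E.map (fun p => p.1)) (fun i => helper.getD i 0)]
  -- identify the key multiset
  have hmapkey : (E.map (fun p => p.1)).map (fun i => helper.getD i 0)
      = E.map (fun p => pvCountB p.2) := by
    rw [List.map_map]
    exact List.map_congr_left (fun p hp => hgetD p hp)
  rw [hmapkey, ← hbkeys]
  -- B's output loop as flatMap
  rw [PySem.List.foldl_append_eq_flatMap (fun c => buckets.getD c [])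
    (PySem.List.sorted buckets.keys (fun c => c) false) []]
  rw [List.nil_append]
  -- identify the fibres
  congr 1
  apply List.flatMap_congr
  intro c _
  rw [hbgetD c, List.filter_map, List.filter_map, List.map_map]
  rw [List.filter_congr (p := (fun a => helper.getD a 0 == c) ∘ fun p : Int × List Int => p.1)
      (q := (fun q : Int × Int => q.1 == c) ∘ fun p : Int × List Int => (pvCountB p.2, p.1))
      (fun p hp => by simp [Function.comp, hgetD p hp])]
  rfl

-- ===== VERDICT (by name: the statement is the Claim_ definition above) =====
theorem solution_884_5_spec : Claim_equal_solution_884_5 := by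
  intro mat k _
  show solution_884_5 mat k = solution_884_5_alt mat k
  exact pv_main mat k
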